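-- pv_equiv track=rewrite | github.com/SutronPyto/LinkPython | pc/sl3_sim.py | _add_crc16_reflected
-- ===== SOURCE A (Python) =====
-- def _add_crc16_reflected(crc, c, poly):
--     crc ^= c
--     for i in range(8):
--         if crc & 1:
--             crc = (crc >> 1) ^ poly
--         else:
--             crc >>= 1
--     return crc
-- ===== SOURCE B (Python) =====
-- # Table-driven reflected CRC update: precompute a 256-entry table per poly
-- # (cached at module level), then one shift + one table lookup per call.
--
-- _CRC_TABLES = {}
--
--
-- def _byte_table(poly):
--     tbl = _CRC_TABLES.get(poly)
--     if tbl is None: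
--         tbl = []
--         for b in range(256):
--             r = b
--             for _ in range(8):
--                 if r & 1:
--                     r = (r >> 1) ^ poly
--                 else:
--                     r >>= 1
--             tbl.append(r)
--         _CRC_TABLES[poly] = tbl
--     return tbl
--
--
-- def _add_crc16_reflected(crc, c, poly):
--     x = crc ^ c
--     return (x >> 8) ^ _byte_table(poly)[x & 0xFF]
-- ===== Notes on version B (the rewrite author's own statement) =====
-- stated objective: alternative
-- what changed: Replaced the per-call 8-iteration bit-by-bit poly reduction with a precomputed (module-level cached) 256-entry byte table per poly, so each call is one xor, one shift and one table lookup: ((crc^c)>>8) ^ T[(crc^c)&0xFF]; exact for all integers because the reduction is GF(2)-linear.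
import Mathlib
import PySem

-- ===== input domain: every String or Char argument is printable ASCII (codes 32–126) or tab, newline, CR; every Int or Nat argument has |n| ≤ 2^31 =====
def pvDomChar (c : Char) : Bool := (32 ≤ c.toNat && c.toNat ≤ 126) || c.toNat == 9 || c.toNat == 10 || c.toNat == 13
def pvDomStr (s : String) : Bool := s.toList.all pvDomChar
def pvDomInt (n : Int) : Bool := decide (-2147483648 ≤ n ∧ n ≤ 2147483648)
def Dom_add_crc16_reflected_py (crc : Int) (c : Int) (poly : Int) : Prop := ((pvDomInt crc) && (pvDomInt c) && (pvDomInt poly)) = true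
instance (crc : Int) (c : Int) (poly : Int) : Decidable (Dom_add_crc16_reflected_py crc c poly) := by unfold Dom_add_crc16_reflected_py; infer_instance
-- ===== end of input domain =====

-- B replaces A's per-call 8-step bit-by-bit poly reduction by a precomputed 256-entry
-- byte table and a single shift + table lookup (equivalence is return-value only;
-- Source B additionally caches the table in a module-level dict, a side effect the port
-- does not model).

-- ===== PORT A =====
def add_crc16_reflected_py (crc : Int) (c : Int) (poly : Int) : Int :=
  (PySem.List.pyRange 0 8 1).foldl
    (fun acc _ =>
      if PySem.Int.band acc 1 ≠ 0 then PySem.Int.bxor (acc >>> (1 : Nat)) poly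
      else acc >>> (1 : Nat))
    (PySem.Int.bxor crc c)

-- ===== PORT B =====
-- _byte_table(poly): the 256-entry table, entry b = b reduced by 8 steps of the poly.
def pvByteTable (poly : Int) : List Int :=
  (PySem.List.pyRange 0 256 1).map (fun b =>
    (PySem.List.pyRange 0 8 1).foldl
      (fun r _ =>
        if PySem.Int.band r 1 ≠ 0 then PySem.Int.bxor (r >>> (1 : Nat)) poly
        else r >>> (1 : Nat))
      b)

def add_crc16_reflected_py_alt (crc : Int) (c : Int) (poly : Int) : Int :=
  let x := PySem.Int.bxor crc c
  PySem.Int.bxor (x >>> (8 : Nat)) (PySem.List.pyGetD (pvByteTable poly) (PySem.Int.band x 255) 0)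

-- ===== PRECONDITION & SPEC =====
def Spec_add_crc16_reflected_py (crc : Int) (c : Int) (poly : Int) (out : Int) : Prop := out = add_crc16_reflected_py_alt crc c poly
instance (crc : Int) (c : Int) (poly : Int) (out : Int) : Decidable (Spec_add_crc16_reflected_py crc c poly out) := by unfold Spec_add_crc16_reflected_py; infer_instance

-- ===== CLAIM (what is proved, stated in full; the proofs are below) =====
def Claim_equal_add_crc16_reflected_py : Prop := ∀ (crc : Int) (c : Int) (poly : Int), Dom_add_crc16_reflected_py crc c poly → Spec_add_crc16_reflected_py crc c poly (add_crc16_reflected_py crc c poly)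

-- ===== LEMMAS AND PROOFS =====

-- One step of the reflected reduction, and its k-fold iterate (step-first, as foldl applies it).
def pvStep (poly x : Int) : Int :=
  if PySem.Int.band x 1 ≠ 0 then PySem.Int.bxor (x >>> (1 : Nat)) poly else x >>> (1 : Nat)

def pvIter (poly : Int) : Nat → Int → Int
  | 0, x => x
  | k+1, x => pvIter poly k (pvStep poly x)

-- PySem.Int.bxor agrees with core Int.xor (so Int.testBit_lxor applies to it).
theorem pv_bxor_eq (a b : Int) : PySem.Int.bxor a b = Int.xor a b := by
  rcases a with m | m <;> rcases b with n | n <;>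
    simp [PySem.Int.bxor, Int.xor, Int.negSucc_eq] <;> omega

-- testBit of Int shifts.
theorem pv_tb_sr (a : Int) (k n : Nat) : (a >>> k).testBit n = a.testBit (k + n) := by
  rcases a with m | m
  · rw [show ((Int.ofNat m) >>> k) = Int.ofNat (m >>> k) from (Int.natCast_shiftRight m k).symm]
    simp [Int.testBit, Nat.testBit_shiftRight]
  · rw [Int.negSucc_shiftRight]
    simp [Int.testBit, Nat.testBit_shiftRight]

theorem pv_tb_sl (a : Int) (k n : Nat) :
    (a <<< k).testBit n = (decide (k ≤ n) && a.testBit (n - k)) := by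
  induction k generalizing n with
  | zero => simp [Int.shiftLeft_zero]
  | succ k ih =>
    rw [Int.shiftLeft_succ', show (2 * (a <<< k)) = Int.bit false (a <<< k) by
      simp [Int.bit_val]]
    cases n with
    | zero => simp [Int.testBit_bit_zero]
    | succ n =>
      rw [show (n+1) = n.succ from rfl, Int.testBit_bit_succ, ih]
      have h1 : (decide (k ≤ n)) = (decide (k + 1 ≤ n + 1)) := by simp
      have h2 : n - k = n + 1 - (k + 1) := by omega
      rw [h1, h2]

-- Int extensionality via testBit.
theorem pv_ext {a b : Int} (h : ∀ n, a.testBit n = b.testBit n) : a = b := by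
  rcases a with m | m <;> rcases b with n | n
  · have := Nat.eq_of_testBit_eq (x := m) (y := n) (fun i => by
      have := h i; simpa [Int.testBit] using this)
    simp [this]
  · exfalso
    have hm : m.testBit (m + n) = false := Nat.testBit_lt_two_pow
      (lt_of_lt_of_le m.lt_two_pow_self (Nat.pow_le_pow_right (by omega) (by omega)))
    have hn : n.testBit (m + n) = false := Nat.testBit_lt_two_pow
      (lt_of_lt_of_le n.lt_two_pow_self (Nat.pow_le_pow_right (by omega) (by omega)))
    have := h (m + n)
    simp [Int.testBit, hm, hn] at this
  · exfalso
    have hm : m.testBit (m + n) = false := Nat.testBit_lt_two_pow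
      (lt_of_lt_of_le m.lt_two_pow_self (Nat.pow_le_pow_right (by omega) (by omega)))
    have hn : n.testBit (m + n) = false := Nat.testBit_lt_two_pow
      (lt_of_lt_of_le n.lt_two_pow_self (Nat.pow_le_pow_right (by omega) (by omega)))
    have := h (m + n)
    simp [Int.testBit, hm, hn] at this
  · have := Nat.eq_of_testBit_eq (x := m) (y := n) (fun i => by
      have := h i; simpa [Int.testBit] using this)
    simp [this]

-- (2^k - 1) - r is the k-bit complement of r (r < 2^k).
theorem pv_nat_sub_mask (k : Nat) : ∀ r n, r < 2^k →
    (2^k - 1 - r).testBit n = (decide (n < k) && !(r.testBit n)) := by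
  induction k with
  | zero =>
    intro r n hr
    have hr0 : r = 0 := by omega
    simp [hr0]
  | succ k ih =>
    intro r n hr
    have hval : 2^(k+1) - 1 - r = 2 * (2^k - 1 - r / 2) + (1 - r % 2) := by
      have h2 : r % 2 < 2 := Nat.mod_lt _ (by omega)
      have h3 : r = 2 * (r / 2) + r % 2 := (Nat.div_add_mod r 2).symm ▸ by omega
      have h4 : r / 2 < 2^k := by omega
      have : (2:Nat)^(k+1) = 2 * 2^k := by ring
      omega
    rw [hval]
    cases n with
    | zero =>
      rw [Nat.testBit_zero, Nat.testBit_zero]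
      have h2 : r % 2 < 2 := Nat.mod_lt _ (by omega)
      have h3 : r % 2 = 0 ∨ r % 2 = 1 := by omega
      rcases h3 with h | h
      · simp [h]
      · simp [h]
    | succ n =>
      rw [Nat.testBit_succ, Nat.testBit_succ]
      have hdiv : (2 * (2^k - 1 - r / 2) + (1 - r % 2)) / 2 = 2^k - 1 - r / 2 := by omega
      rw [hdiv, ih (r / 2) n (by omega)]
      have h5 : (decide (n < k)) = (decide (n + 1 < k + 1)) := by simp
      rw [h5]

-- The two sign cases of x & 255, straight from PySem.Int.band's definition.
theorem pv_band_ofNat (m : Nat) : PySem.Int.band ((m : Nat) : Int) 255 = ((m &&& 255 : Nat) : Int) := by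
  have h1 : (0:Int) ≤ (m:Int) := Int.natCast_nonneg m
  unfold PySem.Int.band
  rw [if_pos h1, if_pos (by norm_num)]
  norm_num [show Int.toNat 255 = 255 from rfl]

theorem pv_band_negSucc (m : Nat) :
    PySem.Int.band (Int.negSucc m) 255 = ((255 - (255 &&& m) : Nat) : Int) := by
  have h0 : ¬ (0:Int) ≤ Int.negSucc m := by rw [Int.negSucc_eq]; omega
  have h2 : (-(Int.negSucc m) - 1) = (m : Int) := by rw [Int.negSucc_eq]; ring
  unfold PySem.Int.band
  rw [if_neg h0, if_pos (by norm_num), h2]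
  norm_num [show Int.toNat 255 = 255 from rfl]

-- testBit of x & 255 (both signs of x).
theorem pv_tb_band255 (x : Int) (n : Nat) :
    (PySem.Int.band x 255).testBit n = (x.testBit n && decide (n < 8)) := by
  have h255 : (255 : Nat) = 2^8 - 1 := by norm_num
  have htb : ∀ (j i : Nat), ((j : Nat) : Int).testBit i = j.testBit i := fun _ _ => rfl
  have htbn : ∀ (j i : Nat), (Int.negSucc j).testBit i = !(j.testBit i) := fun _ _ => rfl
  rcases x with m | m
  · rw [show (Int.ofNat m) = ((m : Nat) : Int) from rfl, pv_band_ofNat, htb, htb,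
      Nat.testBit_and, h255, Nat.testBit_two_pow_sub_one]
  · rw [pv_band_negSucc, htb, htbn]
    have hlt : (255 : Nat) &&& m < 2^8 := by
      have := Nat.and_le_left (n := 255) (m := m); omega
    have hsub := pv_nat_sub_mask 8 (255 &&& m) n hlt
    rw [show (255 : Nat) - (255 &&& m) = 2^8 - 1 - (255 &&& m) by omega, hsub,
      Nat.testBit_and, h255, Nat.testBit_two_pow_sub_one]
    by_cases hn : n < 8 <;> simp [hn]

-- x & 255 lies in [0, 256).
theorem pv_band255_range (x : Int) : 0 ≤ PySem.Int.band x 255 ∧ PySem.Int.band x 255 < 256 := by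
  rcases x with m | m
  · rw [show (Int.ofNat m) = ((m : Nat) : Int) from rfl, pv_band_ofNat]
    have := Nat.and_le_right (n := m) (m := 255)
    constructor
    · exact Int.natCast_nonneg _
    · exact_mod_cast (show (m &&& 255) < 256 by omega)
  · rw [pv_band_negSucc]
    constructor
    · exact Int.natCast_nonneg _
    · exact_mod_cast (show (255 - (255 &&& m)) < 256 by omega)

-- The branch condition of a step reads exactly bit 0.
theorem pv_cond (y : Int) : (PySem.Int.band y 1 ≠ 0) ↔ y.testBit 0 = true := by
  rw [PySem.Int.band_one, PySem.Int.mod_eq_emod_of_pos (by omega)]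
  have htb : ∀ (j i : Nat), ((j : Nat) : Int).testBit i = j.testBit i := fun _ _ => rfl
  have htbn : ∀ (j i : Nat), (Int.negSucc j).testBit i = !(j.testBit i) := fun _ _ => rfl
  rcases y with m | m
  · have h2 : (Int.ofNat m) % 2 = ((m % 2 : Nat) : Int) := by
      show ((m : Nat) : Int) % 2 = ((m % 2 : Nat) : Int)
      push_cast; omega
    rw [h2, show (Int.ofNat m) = ((m : Nat) : Int) from rfl, htb, Nat.testBit_zero]
    constructor
    · intro h; simp; omega
    · intro h; simp at h; omega
  · have h1 : (Int.negSucc m) % 2 = 1 - ((m % 2 : Nat) : Int) := by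
      rw [Int.negSucc_eq]
      have h3 : ((m % 2 : Nat) : Int) = (m : Int) % 2 := by push_cast; omega
      rw [h3]
      omega
    rw [h1, htbn, Nat.testBit_zero]
    constructor
    · intro h
      simp
      omega
    · intro h
      simp at h
      omega

-- One reduction step on a value with k+1 clear-shifted high bits splits off one shift.
theorem pv_step_split (poly h s : Int) (k : Nat) :
    pvStep poly (PySem.Int.bxor (h <<< (k+1)) s) = PySem.Int.bxor (h <<< k) (pvStep poly s) := by
  have hc : (PySem.Int.band (PySem.Int.bxor (h <<< (k+1)) s) 1 ≠ 0) ↔ (PySem.Int.band s 1 ≠ 0) := by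
    rw [pv_cond, pv_cond, pv_bxor_eq, Int.testBit_lxor, pv_tb_sl]
    simp
  have hshift : (PySem.Int.bxor (h <<< (k+1)) s) >>> (1 : Nat) = PySem.Int.bxor (h <<< k) (s >>> (1 : Nat)) := by
    apply pv_ext; intro n
    simp only [pv_bxor_eq, pv_tb_sr, Int.testBit_lxor, pv_tb_sl]
    have h1 : (decide (k + 1 ≤ 1 + n)) = (decide (k ≤ n)) := by simp; omega
    have h2 : 1 + n - (k + 1) = n - k := by omega
    rw [h1, h2]
  unfold pvStep
  by_cases hcond : PySem.Int.band s 1 ≠ 0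
  · rw [if_pos (hc.mpr hcond), if_pos hcond, hshift]
    apply pv_ext; intro n
    rw [pv_bxor_eq, pv_bxor_eq, pv_bxor_eq, pv_bxor_eq, Int.testBit_lxor, Int.testBit_lxor,
      Int.testBit_lxor, Int.testBit_lxor]
    rw [Bool.xor_assoc]
  · rw [if_neg (fun hh => hcond (hc.mp hh)), if_neg hcond, hshift]

-- k steps on (h <<< k) ^ s: the high part just shifts out.
theorem pv_iter_split (poly : Int) (k : Nat) : ∀ h s : Int,
    pvIter poly k (PySem.Int.bxor (h <<< k) s) = PySem.Int.bxor h (pvIter poly k s) := by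
  induction k with
  | zero => intro h s; simp [pvIter, Int.shiftLeft_zero]
  | succ k ih =>
    intro h s
    show pvIter poly k (pvStep poly (PySem.Int.bxor (h <<< (k+1)) s))
        = PySem.Int.bxor h (pvIter poly k (pvStep poly s))
    rw [pv_step_split, ih]

-- Any integer splits as (x >> 8) << 8 xor (x & 255).
theorem pv_split_x (x : Int) :
    PySem.Int.bxor ((x >>> (8 : Nat)) <<< (8 : Nat)) (PySem.Int.band x 255) = x := by
  apply pv_ext; intro n
  simp only [pv_bxor_eq, Int.testBit_lxor, pv_tb_sl, pv_tb_sr, pv_tb_band255]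
  by_cases hn : 8 ≤ n
  · have h8 : 8 + (n - 8) = n := by omega
    simp [hn, h8, show ¬ (n < 8) by omega]
  · simp [hn, show n < 8 by omega]

-- The 8-iteration foldl of both ports is pvIter poly 8.
theorem pv_loop_eq (poly : Int) (x : Int) :
    (PySem.List.pyRange 0 8 1).foldl
      (fun acc _ =>
        if PySem.Int.band acc 1 ≠ 0 then PySem.Int.bxor (acc >>> (1 : Nat)) poly
        else acc >>> (1 : Nat)) x = pvIter poly 8 x := by
  have h : PySem.List.pyRange 0 8 1 = [0, 1, 2, 3, 4, 5, 6, 7] := by decide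
  rw [h]
  simp [List.foldl, pvIter, pvStep]

-- Table lookup at index x & 255 is the byte reduction of x & 255.
theorem pv_table_lookup (poly x : Int) :
    PySem.List.pyGetD (pvByteTable poly) (PySem.Int.band x 255) 0
      = pvIter poly 8 (PySem.Int.band x 255) := by
  obtain ⟨h0, h1⟩ := pv_band255_range x
  unfold pvByteTable
  rw [PySem.List.pyGetD_map_pyRange_of_nonneg _ 256 _ _ h0 h1, pv_loop_eq]

-- ===== VERDICT (by name: the statement is the Claim_ definition above) =====
theorem add_crc16_reflected_py_spec : Claim_equal_add_crc16_reflected_py := by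
  intro crc c poly _
  show add_crc16_reflected_py crc c poly = add_crc16_reflected_py_alt crc c poly
  have hB : add_crc16_reflected_py_alt crc c poly
      = PySem.Int.bxor ((PySem.Int.bxor crc c) >>> (8 : Nat))
          (PySem.List.pyGetD (pvByteTable poly) (PySem.Int.band (PySem.Int.bxor crc c) 255) 0) := rfl
  unfold add_crc16_reflected_py
  rw [hB, pv_loop_eq, pv_table_lookup,
    ← pv_iter_split poly 8 ((PySem.Int.bxor crc c) >>> (8 : Nat)) (PySem.Int.band (PySem.Int.bxor crc c) 255),
    pv_split_x]
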